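-- pv_equiv track=rewrite | github.com/IPU-ChenFei/ipu_icx_network_toolkit | src/accelerator/lib/esxi.py | split_results
-- ===== SOURCE A (Python) =====
-- def split_results(line_list):
--     results = []
--     item = []
--     for line in line_list:
--         if line != "":
--             item.append(line)
--         else:
--             results.append('\n'.join(item))
--             item = []
--     results.append('\n'.join(item))
--     return results
-- ===== SOURCE B (Python) =====
-- def split_results(line_list):
--     if "" not in line_list:
--         return ['\n'.join(line_list)]
--     i = line_list.index("")
--     return ['\n'.join(line_list[:i])] + split_results(line_list[i + 1:])
-- ===== Notes on version B (the rewrite author's own statement) =====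
-- stated objective: alternative
-- what changed: Replaced the single-pass loop with two accumulator lists by recursion on the first '' delimiter: join the prefix before the first empty string (found with index and a slice) and recurse on the suffix after it.
import Mathlib
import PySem

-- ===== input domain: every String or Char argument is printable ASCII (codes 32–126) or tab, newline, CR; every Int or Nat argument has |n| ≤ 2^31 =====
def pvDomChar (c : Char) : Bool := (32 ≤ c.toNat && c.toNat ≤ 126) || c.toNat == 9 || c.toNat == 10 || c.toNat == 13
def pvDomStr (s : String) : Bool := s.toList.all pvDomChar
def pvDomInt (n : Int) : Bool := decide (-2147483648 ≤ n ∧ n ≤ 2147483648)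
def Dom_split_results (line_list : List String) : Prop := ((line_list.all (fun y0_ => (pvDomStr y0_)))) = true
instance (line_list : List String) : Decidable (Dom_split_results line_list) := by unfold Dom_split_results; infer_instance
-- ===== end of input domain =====

-- B recurses on the first "" delimiter (index + slices) instead of A's one-pass loop
-- with two accumulator lists; same values everywhere, no speed claim.

-- ===== PORT A =====
def split_results (line_list : List String) : List String :=
  let st := line_list.foldl
    (fun (st : List String × List String) line =>
      if line ≠ "" then (st.1, st.2 ++ [line])
      else (st.1 ++ [PySem.Str.join "\n" st.2], []))
    ([], [])
  st.1 ++ [PySem.Str.join "\n" st.2]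

-- ===== PORT B =====
def split_results_alt (line_list : List String) : List String :=
  match h : PySem.List.index? line_list "" with
  | none => [PySem.Str.join "\n" line_list]
  | some i =>
      PySem.Str.join "\n" (PySem.List.slice line_list none (some (i : Int))) ::
        split_results_alt (PySem.List.slice line_list (some ((i : Int) + 1)) none)
termination_by line_list.length
decreasing_by
  have hmem : "" ∈ line_list := (PySem.List.index?_isSome_iff _ _).mp (by rw [h]; rfl)
  have : ((i : Int) + 1) = ((i + 1 : Nat) : Int) := by push_cast; ring
  rw [this, PySem.List.slice_from_natCast]
  simp only [List.length_drop]
  have : line_list.length ≠ 0 := by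
    intro hz; exact absurd hmem (by simp [List.eq_nil_of_length_eq_zero hz])
  omega

-- ===== PRECONDITION & SPEC =====
def Spec_split_results (line_list : List String) (out : List String) : Prop := out = split_results_alt line_list
instance (line_list : List String) (out : List String) : Decidable (Spec_split_results line_list out) := by unfold Spec_split_results; infer_instance

-- ===== CLAIM (what is proved, stated in full; the proofs are below) =====
def Claim_equal_split_results : Prop := ∀ (line_list : List String), Dom_split_results line_list → Spec_split_results line_list (split_results line_list)

-- ===== LEMMAS AND PROOFS =====

-- the common characterisation: groups between "" delimiters, each joined with "\n"
def pvGroups (l : List String) : List (List String) := List.splitOnP (fun s => s == "") l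

def pvKey (l : List String) : List String := (pvGroups l).map (PySem.Str.join "\n")

theorem pvModifyHead_triv (l : List (List String)) : l.modifyHead (fun x => x) = l := by
  cases l <;> rfl

theorem loopA (xs : List String) : ∀ (res item : List String),
    (xs.foldl
        (fun (st : List String × List String) line =>
          if line ≠ "" then (st.1, st.2 ++ [line])
          else (st.1 ++ [PySem.Str.join "\n" st.2], []))
        (res, item)).1 ++
      [PySem.Str.join "\n"
        (xs.foldl
          (fun (st : List String × List String) line =>
            if line ≠ "" then (st.1, st.2 ++ [line])
            else (st.1 ++ [PySem.Str.join "\n" st.2], []))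
          (res, item)).2]
    = res ++ ((pvGroups xs).modifyHead (item ++ ·)).map (PySem.Str.join "\n") := by
  induction xs with
  | nil => intro res item; simp [pvGroups, List.splitOnP_nil]
  | cons x xs ih =>
      intro res item
      by_cases hx : x = ""
      · subst hx
        simp only [List.foldl_cons, if_neg (not_not_intro rfl), pvGroups, List.splitOnP_cons]
        simpa [pvGroups, pvModifyHead_triv] using ih (res ++ [PySem.Str.join "\n" item]) []
      · simp only [List.foldl_cons, if_pos hx, pvGroups, List.splitOnP_cons,
          beq_iff_eq, if_neg hx]
        rw [ih res (item ++ [x])]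
        simp only [pvGroups]
        rcases List.splitOnP (fun s => s == "") xs with _ | ⟨g, gs⟩
        · rfl
        · simp

theorem splitA (l : List String) : split_results l = pvKey l := by
  have := loopA l [] []
  simpa [split_results, pvKey, pvModifyHead_triv] using this

theorem splitOnP_of_not_mem (l : List String) (h : "" ∉ l) :
    List.splitOnP (fun s => s == "") l = [l] := by
  induction l with
  | nil => simp [List.splitOnP_nil]
  | cons x xs ih =>
      have hx : x ≠ "" := fun hx => h (hx ▸ List.mem_cons_self)
      rw [List.splitOnP_cons, if_neg (by simpa using hx),
        ih (fun hm => h (List.mem_cons_of_mem _ hm))]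
      rfl

theorem splitOnP_first_delim (pre suf : List String) (h : "" ∉ pre) :
    List.splitOnP (fun s => s == "") (pre ++ "" :: suf)
      = pre :: List.splitOnP (fun s => s == "") suf := by
  induction pre with
  | nil => simp [List.splitOnP_cons]
  | cons x xs ih =>
      have hx : x ≠ "" := fun hx => h (hx ▸ List.mem_cons_self)
      rw [List.cons_append, List.splitOnP_cons, if_neg (by simpa using hx),
        ih (fun hm => h (List.mem_cons_of_mem _ hm))]
      rfl

theorem splitB (l : List String) : split_results_alt l = pvKey l := by
  induction hn : l.length using Nat.strong_induction_on generalizing l with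
  | _ n ih =>
    subst hn
    rw [split_results_alt.eq_def]
    split
    next h =>
      rw [pvKey, pvGroups, splitOnP_of_not_mem l ((PySem.List.index?_eq_none_iff _ _).mp h)]
      rfl
    next i h =>
      obtain ⟨pre, suf, hl, hlen, hpre⟩ := (PySem.List.index?_eq_some_iff _ _ _).mp h
      have hcast : ((i : Int) + 1) = ((i + 1 : Nat) : Int) := by push_cast; ring
      rw [hcast, PySem.List.slice_from_natCast, PySem.List.slice_to_natCast]
      have htake : l.take i = pre := by
        subst hl hlen; simp
      have hdrop : l.drop (i + 1) = suf := by
        subst hl hlen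
        rw [show pre.length + 1 = (pre ++ [("" : String)]).length by simp]
        rw [show pre ++ "" :: suf = (pre ++ [""]) ++ suf by simp]
        exact List.drop_left
      rw [htake, hdrop]
      rw [ih suf.length (by subst hl; simp only [List.length_append, List.length_cons]; omega) suf rfl]
      rw [pvKey, pvKey, pvGroups, pvGroups, hl, splitOnP_first_delim pre suf hpre]
      rfl

-- ===== VERDICT (by name: the statement is the Claim_ definition above) =====
theorem split_results_spec : Claim_equal_split_results := by
  intro l _
  unfold Spec_split_results
  rw [splitA, splitB]
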